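-- pv_equiv track=rewrite | github.com/Selma-Emekci/cs3c_python_ | Recursion & Quick Sort/sort.py | hibbards_gaps
-- ===== SOURCE A (Python) =====
-- def shells_gaps(length):
--     gap = length // 2
--     while gap > 0:
--         yield gap
--         gap //= 2
--
-- def hibbards_gaps(length):
--     if length < 2:
--         return
--     for gap in shells_gaps(length):
--         # hibbards is basically shell gap - 1, except when it's 1.
--         if gap > 1:
--             yield gap - 1
--     if gap - 1 != 1:
--         yield 1
-- ===== SOURCE B (Python) =====
-- def hibbards_gaps(length):
--     # Recursive decomposition: the Hibbard gaps of n are (n//2 - 1) followed by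
--     # the Hibbard gaps of n//2, bottoming out at [1] for 2 <= n < 4.
--     if length < 2:
--         return
--     if length < 4:
--         yield 1
--     else:
--         yield length // 2 - 1
--         yield from hibbards_gaps(length // 2)
-- ===== Notes on version B (the rewrite author's own statement) =====
-- stated objective: simpler
-- what changed: Replaces the generator pipeline (shell-gap generator, >1 filter, leaked-loop-variable final test) with a direct recursion on the structure: yield the first Hibbard gap and recurse on the halved length, bottoming out at a singleton base case.
import Mathlib
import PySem

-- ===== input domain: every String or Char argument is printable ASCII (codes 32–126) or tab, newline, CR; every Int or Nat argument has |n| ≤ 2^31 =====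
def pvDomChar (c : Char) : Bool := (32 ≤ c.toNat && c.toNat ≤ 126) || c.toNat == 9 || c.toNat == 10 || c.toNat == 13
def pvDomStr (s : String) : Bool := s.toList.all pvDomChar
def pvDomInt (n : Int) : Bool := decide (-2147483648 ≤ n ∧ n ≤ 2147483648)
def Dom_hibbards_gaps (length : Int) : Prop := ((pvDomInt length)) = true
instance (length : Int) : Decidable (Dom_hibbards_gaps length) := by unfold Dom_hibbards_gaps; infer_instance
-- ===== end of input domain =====

-- B replaces A's generator pipeline (shell-gap generator, >1 filter, leaked-loop-variable
-- final test) by a direct recursion: gaps(n) = (n//2 - 1) :: gaps(n//2), base [1].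

-- ===== PORT A =====
-- termination helper for the halving loops (cited by name in decreasing_by)
theorem pv_floordiv2_toNat_lt (gap : Int) (hg : 0 < gap) :
    (PySem.Int.floordiv gap 2).toNat < gap.toNat := by
  rw [PySem.Int.floordiv_eq_ediv_of_pos (by norm_num)]; omega

-- generator shells_gaps(length), already seeded with gap = length // 2 by the caller
def shellsGaps (gap : Int) : List Int :=
  if hg : 0 < gap then gap :: shellsGaps (PySem.Int.floordiv gap 2) else []
termination_by gap.toNat
decreasing_by exact pv_floordiv2_toNat_lt _ hg

def hibbards_gaps (length : Int) : List Int :=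
  if length < 2 then [] else
    -- the for-loop: accumulate the yields and carry the loop variable `gap`
    -- (its initial value 0 is never read: for length ≥ 2 the generator is nonempty,
    --  so Python's leaked `gap` is the last yielded shell gap)
    let p := (shellsGaps (PySem.Int.floordiv length 2)).foldl
      (fun (p : List Int × Int) gap => (if gap > 1 then p.1 ++ [gap - 1] else p.1, gap)) ([], 0)
    if p.2 - 1 ≠ 1 then p.1 ++ [1] else p.1

-- ===== PORT B =====
def hibbards_gaps_alt (length : Int) : List Int :=
  if length < 2 then []
  else if h4 : length < 4 then [1]
  else (PySem.Int.floordiv length 2 - 1) :: hibbards_gaps_alt (PySem.Int.floordiv length 2)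
termination_by length.toNat
decreasing_by exact pv_floordiv2_toNat_lt _ (by omega)

-- ===== PRECONDITION & SPEC =====
def Spec_hibbards_gaps (length : Int) (out : List Int) : Prop := out = hibbards_gaps_alt length
instance (length : Int) (out : List Int) : Decidable (Spec_hibbards_gaps length out) := by unfold Spec_hibbards_gaps; infer_instance

-- ===== CLAIM (what is proved, stated in full; the proofs are below) =====
def Claim_equal_hibbards_gaps : Prop := ∀ (length : Int), Dom_hibbards_gaps length → Spec_hibbards_gaps length (hibbards_gaps length)

-- ===== LEMMAS AND PROOFS =====
-- the filtered (gap-1)-list A's for-loop collects over shellsGaps h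
def pvC (h : Int) : List Int :=
  if h1 : h ≤ 1 then [] else (h - 1) :: pvC (PySem.Int.floordiv h 2)
termination_by h.toNat
decreasing_by exact pv_floordiv2_toNat_lt _ (by omega)

-- invariant of A's for-loop: folding over the shell gaps of h (h ≥ 1) collects
-- exactly pvC h and leaves the loop variable at 1
theorem pv_fold (h : Int) (hh : 1 ≤ h) (a : List Int) (x : Int) :
    (shellsGaps h).foldl
      (fun (p : List Int × Int) gap => (if gap > 1 then p.1 ++ [gap - 1] else p.1, gap)) (a, x)
    = (a ++ pvC h, 1) := by
  by_cases h2 : h ≤ 1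
  · have he : h = 1 := by omega
    subst he
    have hfd : PySem.Int.floordiv 1 2 = 0 := by decide
    rw [shellsGaps, dif_pos (by norm_num), hfd, shellsGaps, dif_neg (by norm_num)]
    rw [pvC, dif_pos (by norm_num)]
    simp
  · have hfd : PySem.Int.floordiv h 2 = h / 2 := PySem.Int.floordiv_eq_ediv_of_pos (by norm_num)
    have hh2 : 1 ≤ PySem.Int.floordiv h 2 := by rw [hfd]; omega
    rw [shellsGaps, dif_pos (by omega)]
    simp only [List.foldl_cons, if_pos (show (1:Int) < h by omega)]
    rw [pv_fold (PySem.Int.floordiv h 2) hh2 (a ++ [h - 1]) h]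
    rw [show pvC h = (h - 1) :: pvC (PySem.Int.floordiv h 2) from by rw [pvC, dif_neg h2]]
    simp
termination_by h.toNat
decreasing_by exact pv_floordiv2_toNat_lt _ (by omega)

-- pvC of length//2, plus the trailing 1, is exactly B's recursion
theorem pv_alt (length : Int) (hl : 2 ≤ length) :
    pvC (PySem.Int.floordiv length 2) ++ [1] = hibbards_gaps_alt length := by
  have hfd : PySem.Int.floordiv length 2 = length / 2 :=
    PySem.Int.floordiv_eq_ediv_of_pos (by norm_num)
  by_cases h4 : length < 4
  · have h1 : PySem.Int.floordiv length 2 = 1 := by rw [hfd]; omega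
    rw [h1, pvC, dif_pos (by norm_num),
        hibbards_gaps_alt, if_neg (by omega), dif_pos h4]
    simp
  · have hh : 2 ≤ PySem.Int.floordiv length 2 := by rw [hfd]; omega
    rw [pvC, dif_neg (by omega)]
    rw [hibbards_gaps_alt, if_neg (by omega), dif_neg h4]
    rw [List.cons_append, pv_alt (PySem.Int.floordiv length 2) hh]
termination_by length.toNat
decreasing_by exact pv_floordiv2_toNat_lt _ (by omega)

-- ===== VERDICT (by name: the statement is the Claim_ definition above) =====
theorem hibbards_gaps_spec : Claim_equal_hibbards_gaps := by
  intro length _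
  show hibbards_gaps length = hibbards_gaps_alt length
  by_cases hl : length < 2
  · rw [hibbards_gaps, if_pos hl, hibbards_gaps_alt, if_pos hl]
  · have h1 : 1 ≤ PySem.Int.floordiv length 2 := by
      rw [PySem.Int.floordiv_eq_ediv_of_pos (by norm_num)]; omega
    simp only [hibbards_gaps, if_neg hl]
    rw [pv_fold _ h1]
    simp only [List.nil_append, if_pos (show (1:Int) - 1 ≠ 1 by norm_num)]
    exact pv_alt length (by omega)
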